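-- pv_equiv track=rewrite | github.com/Park323/new-avsr | dataset/utils/convertGrpTxt.py | findGraphemeTokens
-- ===== SOURCE A (Python) =====
-- def findGraphemeTokens(text):
--     result = list()
--     isJS = False
--     for char in text:
--         if isJS:
--             result.append('\\'+char)
--             isJS = False
--         elif char != '\\':
--             result.append(char)
--         else:
--             isJS = True
--     return result
-- ===== SOURCE B (Python) =====
-- import re
--
-- def findGraphemeTokens(text):
--     return re.findall(r'\\[\s\S]|[^\\]', text)
-- ===== Notes on version B (the rewrite author's own statement) =====
-- stated objective: idiomatic
-- what changed: Replaced the manual escape-flag state machine with a single regex findall whose alternation pairs a backslash with its following character and drops a trailing lone backslash.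
import Mathlib
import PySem

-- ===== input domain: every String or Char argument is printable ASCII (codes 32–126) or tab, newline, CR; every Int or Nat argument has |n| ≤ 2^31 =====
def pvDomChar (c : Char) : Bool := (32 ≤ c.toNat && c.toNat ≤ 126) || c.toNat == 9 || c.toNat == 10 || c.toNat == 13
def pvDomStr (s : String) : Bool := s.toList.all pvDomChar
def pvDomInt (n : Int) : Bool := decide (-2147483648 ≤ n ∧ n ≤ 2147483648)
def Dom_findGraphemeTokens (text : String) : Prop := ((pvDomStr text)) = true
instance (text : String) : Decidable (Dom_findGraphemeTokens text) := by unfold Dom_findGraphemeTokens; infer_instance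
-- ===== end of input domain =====

-- B replaces A's explicit escape-flag state machine with a regex-style tokenizer
-- (objective: idiomatic); same return value on every input.

-- ===== PORT A =====
-- A: loop over chars with an isJS flag, appending to a growing result list.
def pvStepA (st : List String × Bool) (c : Char) : List String × Bool :=
  if st.2 then (st.1 ++ [String.mk ['\\', c]], false)
  else if c ≠ '\\' then (st.1 ++ [String.mk [c]], st.2)
  else (st.1, true)

def findGraphemeTokens (text : String) : List String :=
  (text.toList.foldl pvStepA ([], false)).1

-- ===== PORT B =====
-- B in Python: re.findall(r'\\[\s\S]|[^\\]', text). Ported by hand as the regex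
-- engine's left-to-right scan: a backslash pairs with the next character ([\s\S]),
-- any non-backslash matches alone ([^\\]), a trailing lone backslash matches
-- neither alternative and is skipped. Exact on all inputs.
def pvScanB : List Char → List String
  | [] => []
  | '\\' :: c :: rest => String.mk ['\\', c] :: pvScanB rest
  | '\\' :: [] => []
  | c :: rest => String.mk [c] :: pvScanB rest

def findGraphemeTokens_alt (text : String) : List String :=
  pvScanB text.toList

-- ===== PRECONDITION & SPEC =====
def Spec_findGraphemeTokens (text : String) (out : List String) : Prop := out = findGraphemeTokens_alt text
instance (text : String) (out : List String) : Decidable (Spec_findGraphemeTokens text out) := by unfold Spec_findGraphemeTokens; infer_instance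

-- ===== CLAIM (what is proved, stated in full; the proofs are below) =====
def Claim_equal_findGraphemeTokens : Prop := ∀ (text : String), Dom_findGraphemeTokens text → Spec_findGraphemeTokens text (findGraphemeTokens text)

-- ===== LEMMAS AND PROOFS =====

theorem pvScanB_cons_ne (c : Char) (rest : List Char) (h : c ≠ '\\') :
    pvScanB (c :: rest) = String.mk [c] :: pvScanB rest := by
  rw [pvScanB.eq_def]
  split <;> simp_all

-- Loop invariant: folding A's step from (acc, flag) yields acc ++ the B-scan of the
-- remaining input, with flag True behaving like a pending backslash prefix.
theorem pvFoldA_eq (l : List Char) :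
    (∀ acc : List String, (l.foldl pvStepA (acc, false)).1 = acc ++ pvScanB l) ∧
    (∀ acc : List String, (l.foldl pvStepA (acc, true)).1 = acc ++ pvScanB ('\\' :: l)) := by
  induction l with
  | nil => simp [pvScanB]
  | cons c rest ih =>
    constructor
    · intro acc
      by_cases hc : c = '\\'
      · subst hc
        simpa [List.foldl, pvStepA] using ih.2 acc
      · rw [List.foldl, pvScanB_cons_ne c rest hc]
        simp [pvStepA, hc, ih.1]
    · intro acc
      simp [List.foldl, pvStepA, pvScanB, ih.1]

-- ===== VERDICT (by name: the statement is the Claim_ definition above) =====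
theorem findGraphemeTokens_spec : Claim_equal_findGraphemeTokens := by
  intro text _
  unfold Spec_findGraphemeTokens findGraphemeTokens findGraphemeTokens_alt
  simpa using (pvFoldA_eq text.toList).1 []
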